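-- pv_equiv track=rewrite | github.com/martinhildgen-cmyk/425ppm-journaliste-sourcing | backend/app/services/brave_search.py | _is_filtered
-- ===== SOURCE A (Python) =====
-- _FILTERED_DOMAINS = {
--     "facebook.com",
--     "twitter.com",
--     "x.com",
--     "instagram.com",
--     "tiktok.com",
--     "linkedin.com",
--     "youtube.com",
--     "pinterest.com",
--     "pagesjaunes.fr",
--     "societe.com",
--     "kompass.com",
--     "cision.com",
--     "prowly.com",
--     "meltwater.com",
--     "prezly.com",
-- }
--
-- _PROFILE_PATTERNS = [
--     "/author/",
--     "/auteur/",
--     "/journaliste/",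
--     "/journalist/",
--     "/profile/",
--     "/profil/",
--     "/contributor/",
--     "/signataires/",
--     "ses-dernieres-publications",
--     "ses-derniers-articles",
--     "biographie",
-- ]
--
-- def _is_filtered(url: str) -> bool:
--     """Return True if the URL belongs to a filtered domain or is a profile page."""
--     url_lower = url.lower()
--     try:
--         # Check domain
--         host = url_lower.split("//", 1)[1].split("/", 1)[0]
--         for domain in _FILTERED_DOMAINS:
--             if host == domain or host.endswith(f".{domain}"):
--                 return True
--     except (IndexError, AttributeError):
--         pass
--
--     # Check URL path patterns that indicate profile/author pages
--     for pattern in _PROFILE_PATTERNS: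
--         if pattern in url_lower:
--             return True
--
--     return False
-- ===== SOURCE B (Python) =====
-- _FILTERED_DOMAINS = {
--     "facebook.com",
--     "twitter.com",
--     "x.com",
--     "instagram.com",
--     "tiktok.com",
--     "linkedin.com",
--     "youtube.com",
--     "pinterest.com",
--     "pagesjaunes.fr",
--     "societe.com",
--     "kompass.com",
--     "cision.com",
--     "prowly.com",
--     "meltwater.com",
--     "prezly.com",
-- }
--
-- _PROFILE_PATTERNS = [
--     "/author/",
--     "/auteur/",
--     "/journaliste/",
--     "/journalist/",
--     "/profile/",
--     "/profil/",
--     "/contributor/",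
--     "/signataires/",
--     "ses-dernieres-publications",
--     "ses-derniers-articles",
--     "biographie",
-- ]
--
--
-- def _is_filtered(url: str) -> bool:
--     """Return True if the URL belongs to a filtered domain or is a profile page."""
--     u = url.lower()
--     parts = u.split("//", 1)
--     if len(parts) == 2:
--         host = parts[1].split("/", 1)[0]
--         # walk the host label by label: test the host itself, then the tail
--         # after the first dot, and so on; one set lookup per label-boundary
--         # suffix instead of ==/endswith against every filtered domain
--         cur = host
--         while True:
--             if cur in _FILTERED_DOMAINS:
--                 return True
--             k = cur.find(".")
--             if k == -1:
--                 break
--             cur = cur[k + 1:]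
--     return any(u.find(p) != -1 for p in _PROFILE_PATTERNS)
-- ===== Notes on version B (the rewrite author's own statement) =====
-- stated objective: alternative
-- what changed: B drops the try/except in favour of a length check on the limited double-slash split, replaces A's scan over all filtered domains (equality/endswith per domain) by a while-loop that walks the host label by label doing one set-membership test per label-boundary suffix, and tests profile patterns via find returning -1 instead of substring containment.
import Mathlib
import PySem

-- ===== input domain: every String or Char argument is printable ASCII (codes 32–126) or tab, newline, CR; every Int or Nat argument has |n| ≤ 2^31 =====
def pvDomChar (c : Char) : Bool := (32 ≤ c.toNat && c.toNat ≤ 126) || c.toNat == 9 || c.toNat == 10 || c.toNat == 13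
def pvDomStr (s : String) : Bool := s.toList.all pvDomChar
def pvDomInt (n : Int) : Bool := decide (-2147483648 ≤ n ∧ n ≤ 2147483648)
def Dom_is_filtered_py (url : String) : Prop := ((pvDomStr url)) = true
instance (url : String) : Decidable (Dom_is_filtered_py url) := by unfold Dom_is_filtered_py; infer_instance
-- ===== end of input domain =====

-- B replaces A's try/except + scan over all filtered domains (==/endswith per domain) by a
-- length-checked split and a label-by-label walk down the host testing one set membership per
-- label-boundary suffix; the pattern check uses find != -1 (alternative, not claimed faster).

-- ===== PORT A =====
def pvFilteredDomains : List (List Char) :=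
  ["facebook.com".toList, "twitter.com".toList, "x.com".toList, "instagram.com".toList,
   "tiktok.com".toList, "linkedin.com".toList, "youtube.com".toList, "pinterest.com".toList,
   "pagesjaunes.fr".toList, "societe.com".toList, "kompass.com".toList, "cision.com".toList,
   "prowly.com".toList, "meltwater.com".toList, "prezly.com".toList]

def pvProfilePatterns : List (List Char) :=
  ["/author/".toList, "/auteur/".toList, "/journaliste/".toList, "/journalist/".toList,
   "/profile/".toList, "/profil/".toList, "/contributor/".toList, "/signataires/".toList,
   "ses-dernieres-publications".toList, "ses-derniers-articles".toList, "biographie".toList]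

-- the try-block expression u.split("//",1)[1].split("/",1)[0] is ported as an Option chain:
-- none = the IndexError the except catches (fall through to the pattern loop);
-- the for-loop over the Python set _FILTERED_DOMAINS returns True iff some element matches,
-- which is independent of the set's iteration order, so it is ported as List.any
def pvHostA (u : List Char) : Option (List Char) :=
  (PySem.Chars.splitMax? u ['/', '/'] 1).bind fun parts =>
  (PySem.List.pyGet? parts 1).bind fun rest =>
  (PySem.Chars.splitMax? rest ['/'] 1).bind fun parts2 =>
  PySem.List.pyGet? parts2 0

def is_filtered_py (url : String) : Bool :=
  let u := PySem.Chars.lower url.toList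
  let domHit :=
    match pvHostA u with
    | none => false
    | some host =>
      pvFilteredDomains.any (fun d => host == d || PySem.Chars.endswith host ('.' :: d))
  domHit || pvProfilePatterns.any (fun p => PySem.Chars.isIn p u)

-- ===== PORT B =====
-- the while-loop of Source B: test cur against the filtered-domain set, then continue with the
-- tail after cur's first dot; terminates because that tail is strictly shorter
def pvWalkLabels (cur : List Char) : Bool :=
  if pvFilteredDomains.contains cur then true
  else
    let k := PySem.Chars.find cur ['.']
    if h : k = -1 then false
    else pvWalkLabels (PySem.Chars.slice cur (some (k + 1)) none)
termination_by cur.length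
decreasing_by
  simp only [PySem.Chars.slice_eq_listSlice]
  have hk : -1 ≤ PySem.Chars.find cur ['.'] := PySem.Chars.neg_one_le_find _ _
  rw [PySem.List.slice_from _ (by omega)]
  have hinf : ['.'] <:+: cur := (PySem.Chars.find_ne_neg_one_iff _ _).mp h
  have h1 : 1 ≤ cur.length := by simpa using hinf.length_le
  simp only [List.length_drop]
  omega

def is_filtered_py_alt (url : String) : Bool :=
  let u := PySem.Chars.lower url.toList
  let parts := PySem.Chars.splitOnMax u ['/', '/'] 1
  let domHit :=
    if parts.length = 2 then
      pvWalkLabels ((PySem.Chars.splitOnMax (parts.getD 1 []) ['/'] 1).headD [])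
    else false
  if domHit then true
  else pvProfilePatterns.any (fun p => !(PySem.Chars.find u p == -1))

-- ===== PRECONDITION & SPEC =====
def Spec_is_filtered_py (url : String) (out : Bool) : Prop := out = is_filtered_py_alt url
instance (url : String) (out : Bool) : Decidable (Spec_is_filtered_py url out) := by unfold Spec_is_filtered_py; infer_instance

-- ===== CLAIM (what is proved, stated in full; the proofs are below) =====
def Claim_equal_is_filtered_py : Prop := ∀ (url : String), Dom_is_filtered_py url → Spec_is_filtered_py url (is_filtered_py url)

-- ===== LEMMAS AND PROOFS =====

-- split(sep, 1) yields one or two pieces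
lemma pv_go_len (sep : List Char) : ∀ (fuel m : Nat) (l cur : List Char) (acc : List (List Char)),
    acc.length + 1 ≤ (PySem.Chars.splitOnMax.go sep fuel m l cur acc).length ∧
    (PySem.Chars.splitOnMax.go sep fuel m l cur acc).length ≤ acc.length + m + 1 := by
  intro fuel
  induction fuel with
  | zero =>
    intro m l cur acc
    constructor <;> simp [PySem.Chars.splitOnMax.go]
  | succ n ih =>
    intro m l cur acc
    cases l with
    | nil => simp [PySem.Chars.splitOnMax.go]
    | cons c rest =>
      rw [PySem.Chars.splitOnMax.go]
      by_cases hm : m = 0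
      · simp [hm]
      · simp only [hm, if_false]
        by_cases hp : sep.isPrefixOf (c :: rest) = true
        · simp only [hp, if_true]
          have := ih (m - 1) (List.drop sep.length (c :: rest)) [] (cur.reverse :: acc)
          simp at this; omega
        · simp only [Bool.not_eq_true] at hp
          simp only [hp, Bool.false_eq_true, if_false]
          exact ih m rest (c :: cur) acc

lemma pv_splitOnMax_one_len (s sep : List Char) :
    1 ≤ (PySem.Chars.splitOnMax s sep 1).length ∧ (PySem.Chars.splitOnMax s sep 1).length ≤ 2 := by
  rw [PySem.Chars.splitOnMax]
  simp only [show ¬ ((1:Int) < 0) by omega, if_false]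
  have := pv_go_len sep (s.length + 1) (Int.toNat 1) s [] []
  simpa using this

-- A's try-block host equals B's length-checked extraction
lemma pv_hostA_eq (u : List Char) :
    pvHostA u =
      (if (PySem.Chars.splitOnMax u ['/', '/'] 1).length = 2 then
        some ((PySem.Chars.splitOnMax ((PySem.Chars.splitOnMax u ['/', '/'] 1).getD 1 []) ['/'] 1).headD [])
      else none) := by
  unfold pvHostA
  rw [PySem.Chars.splitMax?]
  simp only [List.isEmpty_cons, Bool.false_eq_true, if_false, Option.bind_some]
  have hlen := pv_splitOnMax_one_len u ['/', '/']
  set parts := PySem.Chars.splitOnMax u ['/', '/'] 1 with hparts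
  by_cases h2 : parts.length = 2
  · simp only [h2, if_true]
    have h1 : PySem.List.pyGet? parts 1 = some (parts.getD 1 []) := by
      have : PySem.List.pyGet? parts ((1 : Nat) : Int) = parts[(1:Nat)]? := PySem.List.pyGet?_natCast parts 1
      simp only [Nat.cast_one] at this
      rw [this, List.getElem?_eq_getElem (by omega)]
      simp [List.getD, List.getElem?_eq_getElem (show 1 < parts.length by omega)]
    rw [h1, Option.bind_some, PySem.Chars.splitMax?]
    simp only [List.isEmpty_cons, Bool.false_eq_true, if_false, Option.bind_some]
    have hlen2 := pv_splitOnMax_one_len (parts.getD 1 []) ['/']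
    obtain ⟨a, t, hat⟩ := List.exists_cons_of_ne_nil
      (l := PySem.Chars.splitOnMax (parts.getD 1 []) ['/'] 1)
      (by intro hnil; rw [hnil] at hlen2; simp at hlen2)
    have h0 : PySem.List.pyGet? (PySem.Chars.splitOnMax (parts.getD 1 []) ['/'] 1) 0
        = some ((PySem.Chars.splitOnMax (parts.getD 1 []) ['/'] 1).headD []) := by
      have hcast : PySem.List.pyGet? (PySem.Chars.splitOnMax (parts.getD 1 []) ['/'] 1) ((0 : Nat) : Int)
          = (PySem.Chars.splitOnMax (parts.getD 1 []) ['/'] 1)[(0:Nat)]? :=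
        PySem.List.pyGet?_natCast _ 0
      simp only [Nat.cast_zero] at hcast
      rw [hcast, hat]
      simp
    rw [h0]
  · simp only [h2, if_false]
    have h1 : PySem.List.pyGet? parts 1 = none := by
      have : PySem.List.pyGet? parts ((1 : Nat) : Int) = parts[(1:Nat)]? := PySem.List.pyGet?_natCast parts 1
      simp only [Nat.cast_one] at this
      rw [this, List.getElem?_eq_none (by omega)]
    rw [h1, Option.bind_none]

-- singleton-prefix-of-drop ↔ the character at that index
lemma pv_prefix_drop_iff (l : List Char) (c : Char) (i : Nat) (h : i < l.length) :
    [c] <+: l.drop i ↔ l[i] = c := by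
  rw [← List.getElem_cons_drop h]
  constructor
  · rintro ⟨t2, ht2⟩
    rw [List.singleton_append] at ht2
    exact ((List.cons_eq_cons).mp ht2).1.symm
  · intro hc
    exact ⟨l.drop (i + 1), by rw [hc]; rfl⟩

-- suffix starting with a dot ↔ a dot at some index with the matching tail
lemma pv_suffix_dot (cs d : List Char) :
    ('.' :: d) <:+ cs ↔ ∃ i : Nat, ∃ h : i < cs.length, cs[i] = '.' ∧ cs.drop (i + 1) = d := by
  constructor
  · rintro ⟨t, rfl⟩
    refine ⟨t.length, by simp, by simp, by simp⟩
  · rintro ⟨i, h, hc, hd⟩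
    refine ⟨cs.take i, ?_⟩
    have hdrop := List.getElem_cons_drop h
    rw [hc, hd] at hdrop
    rw [hdrop, List.take_append_drop]

-- the label walk of B visits exactly the label-boundary suffixes A's ==/endswith scan accepts
lemma pv_walk_eq : ∀ (n : Nat) (host : List Char), host.length ≤ n →
    pvWalkLabels host
      = pvFilteredDomains.any (fun d => host == d || PySem.Chars.endswith host ('.' :: d)) := by
  intro n
  induction n with
  | zero =>
    intro host hlen
    have : host = [] := List.eq_nil_of_length_eq_zero (by omega)
    subst this
    rw [pvWalkLabels]
    decide
  | succ n ih =>
    intro host hlen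
    rw [pvWalkLabels]
    rw [Bool.eq_iff_iff]
    simp only [List.any_eq_true, Bool.or_eq_true, beq_iff_eq, PySem.Chars.endswith_iff]
    by_cases hmem : pvFilteredDomains.contains host = true
    · simp only [hmem, if_true, true_iff]
      exact ⟨host, by simpa using hmem, Or.inl rfl⟩
    · simp only [hmem, Bool.false_eq_true, if_false]
      have hnotmem : host ∉ pvFilteredDomains := by simpa using hmem
      by_cases hfind : PySem.Chars.find host ['.'] = -1
      · simp only [hfind, dif_pos]
        constructor
        · intro hc; exact absurd hc (by simp)
        · rintro ⟨d, hd, hcase⟩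
          rcases hcase with rfl | hsuf
          · exact absurd hd hnotmem
          · exfalso
            apply (PySem.Chars.find_eq_neg_one_iff _ _).mp hfind
            have hdotmem : '.' ∈ host := hsuf.subset (by simp)
            obtain ⟨s, t, rfl⟩ := List.append_of_mem hdotmem
            exact ⟨s, t, by simp⟩
      · simp only [hfind, dif_neg, not_false_iff]
        have hk0 : 0 ≤ PySem.Chars.find host ['.'] := by
          have := PySem.Chars.neg_one_le_find host ['.']
          omega
        set k := PySem.Chars.find host ['.'] with hkdef
        obtain ⟨hpre, hmin⟩ := PySem.Chars.find_spec (s := host) (sub := ['.']) hk0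
        set K := k.toNat with hKdef
        have hKlt : K < host.length := by
          by_contra hcon
          push Not at hcon
          rw [List.drop_eq_nil_of_le hcon] at hpre
          simpa using hpre.length_le
        have hdotK : host[K] = '.' := (pv_prefix_drop_iff host '.' K hKlt).mp hpre
        have hslice : PySem.Chars.slice host (some (k + 1)) none = host.drop (K + 1) := by
          simp only [PySem.Chars.slice_eq_listSlice]
          rw [PySem.List.slice_from _ (by omega)]
          congr 1
          omega
        rw [hslice]
        have hnextlen : (host.drop (K + 1)).length ≤ n := by
          simp only [List.length_drop]
          omega
        rw [ih (host.drop (K + 1)) hnextlen]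
        simp only [List.any_eq_true, Bool.or_eq_true, beq_iff_eq, PySem.Chars.endswith_iff]
        constructor
        · rintro ⟨d, hd, hcase⟩
          refine ⟨d, hd, Or.inr ?_⟩
          rcases hcase with rfl | hsuf
          · exact (pv_suffix_dot host _).mpr ⟨K, hKlt, hdotK, rfl⟩
          · exact hsuf.trans (List.drop_suffix _ _)
        · rintro ⟨d, hd, hcase⟩
          rcases hcase with rfl | hsuf
          · exact absurd hd hnotmem
          · obtain ⟨i, hi, hdoti, hdropi⟩ := (pv_suffix_dot host d).mp hsuf
            have hKle : K ≤ i := by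
              by_contra hcon
              push Not at hcon
              exact hmin i hcon ((pv_prefix_drop_iff host '.' i hi).mpr hdoti)
            rcases Nat.eq_or_lt_of_le hKle with rfl | hKlt2
            · exact ⟨d, hd, Or.inl hdropi⟩
            · refine ⟨d, hd, Or.inr ?_⟩
              rw [pv_suffix_dot]
              have hjlt : i - K - 1 < (host.drop (K + 1)).length := by
                simp only [List.length_drop]; omega
              refine ⟨i - K - 1, hjlt, ?_, ?_⟩
              · rw [List.getElem_drop]
                have : K + 1 + (i - K - 1) = i := by omega
                simp_all
              · rw [List.drop_drop]
                rw [show K + 1 + (i - K - 1 + 1) = i + 1 by omega]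
                exact hdropi

-- the unchanged pattern half: p in u  ↔  u.find(p) != -1
lemma pv_pat (u p : List Char) : PySem.Chars.isIn p u = !(PySem.Chars.find u p == -1) := by
  rw [Bool.eq_iff_iff, PySem.Chars.isIn_iff_infix]
  simp [← PySem.Chars.find_ne_neg_one_iff]

-- ===== VERDICT (by name: the statement is the Claim_ definition above) =====
theorem is_filtered_py_spec : Claim_equal_is_filtered_py := by
  intro url _
  unfold Spec_is_filtered_py
  show is_filtered_py url = is_filtered_py_alt url
  simp only [is_filtered_py, is_filtered_py_alt]
  rw [pv_hostA_eq]
  simp only [pv_pat]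
  by_cases h2 : (PySem.Chars.splitOnMax (PySem.Chars.lower url.toList) ['/', '/'] 1).length = 2
  · simp only [h2, if_true]
    rw [← pv_walk_eq _ _ (le_refl _)]
    cases pvWalkLabels ((PySem.Chars.splitOnMax ((PySem.Chars.splitOnMax (PySem.Chars.lower url.toList) ['/', '/'] 1).getD 1 []) ['/'] 1).headD []) <;> simp
  · simp only [h2, if_false]
    simp
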